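-- pv_equiv track=rewrite | github.com/AllenWLynch/craft_server | craftapp/admin.py | slotdata_validation
-- ===== SOURCE A (Python) =====
-- def slotdata_validation(slot_str):
--     component_slots = slot_str.split(',')
--     if len(component_slots) > 9:
--         return False
--     for slot in component_slots:
--         if not slot in ['1','2','3','4','5','6','7','8','9','*']:
--             return False
--     return True
-- ===== SOURCE B (Python) =====
-- VALID_CHARS = '123456789*'
--
-- def slotdata_validation(slot_str):
--     n = len(slot_str)
--     if n % 2 == 0 or n > 17:
--         return False
--     return all(c == ',' if i % 2 else c in VALID_CHARS
--                for i, c in enumerate(slot_str))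
-- ===== Notes on version B (the rewrite author's own statement) =====
-- stated objective: simpler
-- what changed: Instead of splitting on commas and scanning the token list against a membership list, B validates positionally in one pass: length must be odd and at most 17, valid slot characters at even indices and commas at odd indices.
import Mathlib
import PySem

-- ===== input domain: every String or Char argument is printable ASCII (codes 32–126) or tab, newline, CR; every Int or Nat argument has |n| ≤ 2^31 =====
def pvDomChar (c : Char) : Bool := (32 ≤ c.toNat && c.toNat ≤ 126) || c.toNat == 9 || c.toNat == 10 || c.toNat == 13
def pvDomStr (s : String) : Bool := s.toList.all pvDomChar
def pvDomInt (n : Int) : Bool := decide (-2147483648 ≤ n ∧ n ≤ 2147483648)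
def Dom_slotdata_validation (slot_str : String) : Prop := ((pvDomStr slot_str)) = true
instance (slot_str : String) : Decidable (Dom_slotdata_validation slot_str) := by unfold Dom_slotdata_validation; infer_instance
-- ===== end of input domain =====

-- B replaces A's split-then-scan-tokens validation by a single positional character scan
-- (odd length ≤ 17, valid char at even positions, comma at odd positions) — simpler, no intermediate token list.

-- ===== PORT A =====
-- the list literal ['1','2','3','4','5','6','7','8','9','*'] of A
def pvAValids : List (List Char) :=
  [['1'], ['2'], ['3'], ['4'], ['5'], ['6'], ['7'], ['8'], ['9'], ['*']]

-- A's for-loop with early return False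
def pvALoop : List (List Char) → Bool
  | [] => true
  | slot :: rest => if !(pvAValids.contains slot) then false else pvALoop rest

def slotdata_validation (slot_str : String) : Bool :=
  let component_slots := PySem.Chars.splitOn slot_str.toList [',']
  if component_slots.length > 9 then false
  else pvALoop component_slots

-- ===== PORT B =====
-- VALID_CHARS = '123456789*'
def pvValidChars : List Char := "123456789*".toList

def slotdata_validation_alt (slot_str : String) : Bool :=
  let cs := slot_str.toList
  let n := cs.length
  if n % 2 == 0 || n > 17 then false
  else (PySem.List.enumerate cs).all
        (fun ic => if PySem.Int.mod ic.1 2 ≠ 0 then ic.2 == ','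
                   else PySem.Chars.isIn [ic.2] pvValidChars)

-- ===== PRECONDITION & SPEC =====
def Spec_slotdata_validation (slot_str : String) (out : Bool) : Prop := out = slotdata_validation_alt slot_str
instance (slot_str : String) (out : Bool) : Decidable (Spec_slotdata_validation slot_str out) := by unfold Spec_slotdata_validation; infer_instance

-- ===== CLAIM (what is proved, stated in full; the proofs are below) =====
def Claim_equal_slotdata_validation : Prop := ∀ (slot_str : String), Dom_slotdata_validation slot_str → Spec_slotdata_validation slot_str (slotdata_validation slot_str)

-- ===== LEMMAS AND PROOFS =====

-- simple structural recursion equal to PySem.Chars.splitOn on separator [',']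
def pvSplit1 : List Char → List Char → List (List Char)
  | pre, [] => [pre]
  | pre, c :: r => if c = ',' then pre :: pvSplit1 [] r else pvSplit1 (pre ++ [c]) r

-- alternating character check, b = "a comma is expected here"
def pvBeta : Bool → List Char → Bool
  | _, [] => true
  | false, c :: r => pvValidChars.contains c && pvBeta true r
  | true, c :: r => (c == ',') && pvBeta false r

theorem pvSplit1_nil (pre : List Char) : pvSplit1 pre [] = [pre] := rfl

theorem pvSplit1_comma (pre : List Char) (r : List Char) :
    pvSplit1 pre (',' :: r) = pre :: pvSplit1 [] r := by simp [pvSplit1]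

theorem pvSplit1_nc {c : Char} (h : ¬ c = ',') (pre : List Char) (r : List Char) :
    pvSplit1 pre (c :: r) = pvSplit1 (pre ++ [c]) r := by simp [pvSplit1, h]

theorem pvValidChars_eq : pvValidChars = ['1','2','3','4','5','6','7','8','9','*'] := by
  decide

theorem pvGo_eq (cs : List Char) : ∀ (fuel : Nat) (cur : List Char) (acc : List (List Char)),
    cs.length < fuel →
    PySem.Chars.splitOn.go [','] fuel cs cur acc = acc.reverse ++ pvSplit1 cur.reverse cs := by
  induction cs with
  | nil =>
      intro fuel cur acc h
      obtain ⟨f, rfl⟩ : ∃ f, fuel = f + 1 := ⟨fuel - 1, by omega⟩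
      rw [PySem.Chars.splitOn.go]
      · simp [pvSplit1]
      · omega
  | cons c r ih =>
      intro fuel cur acc h
      obtain ⟨f, rfl⟩ : ∃ f, fuel = f + 1 := ⟨fuel - 1, by omega⟩
      rw [PySem.Chars.splitOn.go]
      simp only [List.isPrefixOf, List.length_cons, List.length_nil, List.length_singleton] at *
      by_cases hc : c = ','
      · subst hc
        simp only [beq_self_eq_true, Bool.true_and, List.isPrefixOf_nil_left, if_pos,
          List.drop_succ_cons, List.drop_zero]
        rw [ih f [] (cur.reverse :: acc) (by omega)]
        simp [pvSplit1]
      · have hbe : ((',' : Char) == c) = false := by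
          simp only [beq_eq_false_iff_ne, ne_eq]
          exact fun h' => hc h'.symm
        simp only [hbe, Bool.false_and, Bool.false_eq_true, if_false]
        rw [ih f (c :: cur) acc (by omega)]
        simp [pvSplit1, hc]

theorem pvSplitOn_eq (cs : List Char) :
    PySem.Chars.splitOn cs [','] = pvSplit1 [] cs := by
  rw [PySem.Chars.splitOn, pvGo_eq cs (cs.length + 1) [] [] (by omega)]
  simp

theorem pvALoop_eq_all (ts : List (List Char)) : pvALoop ts = ts.all (pvAValids.contains ·) := by
  induction ts with
  | nil => rfl
  | cons t ts ih =>
      simp only [pvALoop, List.all_cons, ih]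
      cases h : pvAValids.contains t
      · simp [h]
      · simp [h]

theorem pvVTok_singleton (p : Char) : [p] ∈ pvAValids ↔ p ∈ pvValidChars := by
  simp [pvAValids, pvValidChars_eq, List.mem_cons, List.cons.injEq]

theorem pvVTok_length {t : List Char} (h : t ∈ pvAValids) : t.length = 1 := by
  fin_cases h <;> rfl

theorem pvVTok_big {t : List Char} (h : 2 ≤ t.length) : t ∉ pvAValids := by
  intro hm; have := pvVTok_length hm; omega

theorem pvVTok_singleton_b (p : Char) :
    pvAValids.contains [p] = pvValidChars.contains p := by
  by_cases hp : p ∈ pvValidChars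
  · simp [hp, (pvVTok_singleton p).2 hp]
  · have h1 : [p] ∉ pvAValids := fun h => hp ((pvVTok_singleton p).1 h)
    simp [h1, hp]

theorem pvNil_not_valid : ([] : List Char) ∉ pvAValids := by decide

theorem pvComma_not_valid : (',' : Char) ∉ pvValidChars := by decide

-- a first token that is already ≥ 2 chars long can never be valid
theorem pvQ (cs : List Char) : ∀ (pre : List Char), 2 ≤ pre.length →
    (pvSplit1 pre cs).all (pvAValids.contains ·) = false := by
  induction cs with
  | nil =>
      intro pre hp
      simp [pvSplit1_nil, pvVTok_big hp]
  | cons c r ih =>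
      intro pre hp
      by_cases hc : c = ','
      · subst hc
        simp [pvSplit1_comma, pvVTok_big hp]
      · rw [pvSplit1_nc hc]
        exact ih (pre ++ [c]) (by simp; omega)

-- the valid-token condition on the split, expressed positionally
theorem pvMain (cs : List Char) :
    ((pvSplit1 [] cs).all (pvAValids.contains ·)
        = (pvBeta false cs && decide (cs.length % 2 = 1)))
    ∧ (∀ p, (pvSplit1 [p] cs).all (pvAValids.contains ·)
        = (pvValidChars.contains p && pvBeta true cs && decide (cs.length % 2 = 0))) := by
  induction cs with
  | nil =>
      refine ⟨by simp [pvSplit1_nil, pvNil_not_valid], fun p => ?_⟩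
      simp [pvSplit1_nil, pvBeta, pvVTok_singleton]
  | cons c r ih =>
      obtain ⟨ih0, ih1⟩ := ih
      have hpar1 : ∀ n : Nat, (decide (n % 2 = 0)) = (decide ((n + 1) % 2 = 1)) := by
        intro n; by_cases h : n % 2 = 0 <;> simp [h] <;> omega
      have hpar2 : ∀ n : Nat, (decide (n % 2 = 1)) = (decide ((n + 1) % 2 = 0)) := by
        intro n; by_cases h : n % 2 = 1 <;> simp [h] <;> omega
      constructor
      · by_cases hc : c = ','
        · subst hc
          simp [pvSplit1_comma, pvBeta, pvNil_not_valid, pvComma_not_valid]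
        · rw [pvSplit1_nc hc, List.nil_append, ih1 c]
          have hbe : (c == ',') = false := by simpa using hc
          simp only [pvBeta, List.length_cons]
          rw [hpar1]
          simp only [Bool.not_false, Bool.and_assoc]
          rfl
      · intro p
        by_cases hc : c = ','
        · subst hc
          rw [pvSplit1_comma, List.all_cons, ih0]
          simp only [pvBeta, beq_self_eq_true, Bool.true_and, List.length_cons]
          rw [hpar2, pvVTok_singleton_b p]
          ac_rfl
        · rw [pvSplit1_nc hc, pvQ r ([p] ++ [c]) (by simp)]
          have hbe : (c == ',') = false := by simpa using hc
          simp [pvBeta, hbe]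

-- all tokens valid forces the exact length relation
theorem pvLenRel (cs : List Char) : ∀ (pre : List Char),
    (pvSplit1 pre cs).all (pvAValids.contains ·) = true →
    cs.length + pre.length + 1 = 2 * (pvSplit1 pre cs).length := by
  induction cs with
  | nil =>
      intro pre h
      simp only [pvSplit1_nil, List.all_cons, List.all_nil, Bool.and_true] at h
      have := pvVTok_length (by simpa using h)
      simp [pvSplit1_nil, this]
  | cons c r ih =>
      intro pre h
      by_cases hc : c = ','
      · subst hc
        rw [pvSplit1_comma] at h ⊢
        rw [List.all_cons, Bool.and_eq_true] at h
        obtain ⟨h1, h2⟩ := h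
        have hp := pvVTok_length (by simpa using h1)
        have := ih [] h2
        simp only [List.length_nil] at this
        simp only [List.length_cons, hp]
        omega
      · rw [pvSplit1_nc hc] at h ⊢
        have := ih (pre ++ [c]) h
        simp only [List.length_append, List.length_cons, List.length_nil] at this ⊢
        omega

theorem pvIsIn_singleton (c : Char) (l : List Char) :
    PySem.Chars.isIn [c] l = l.contains c := by
  by_cases h : c ∈ l
  · obtain ⟨s, t, rfl⟩ := List.append_of_mem h
    rw [(PySem.Chars.isIn_iff_infix _ _).2 ⟨s, t, by simp⟩]
    simp [h]
  · rw [(PySem.Chars.isIn_eq_false_iff _ _).2 (fun hinf => h (hinf.subset (by simp)))]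
    simp [h]

theorem pvEnum_eq_beta (cs : List Char) : ∀ (i : Int), 0 ≤ i →
    ((PySem.List.enumerate cs i).all
      (fun ic => if PySem.Int.mod ic.1 2 ≠ 0 then ic.2 == ','
                 else PySem.Chars.isIn [ic.2] pvValidChars))
      = pvBeta (decide (PySem.Int.mod i 2 ≠ 0)) cs := by
  induction cs with
  | nil => intro i _; simp [PySem.List.enumerate, pvBeta]
  | cons c r ih =>
      intro i hi
      rw [PySem.List.enumerate_cons]
      simp only [List.all_cons, ih (i + 1) (by omega)]
      have hmod : PySem.Int.mod i 2 = i % 2 := Int.fmod_eq_emod_of_nonneg _ (by omega)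
      have hmod1 : PySem.Int.mod (i + 1) 2 = (i + 1) % 2 := Int.fmod_eq_emod_of_nonneg _ (by omega)
      have h2 : i % 2 = 0 ∨ i % 2 = 1 := by omega
      rcases h2 with h2 | h2
      · have : (i + 1) % 2 = 1 := by omega
        simp [pvBeta, hmod, hmod1, h2, this, pvIsIn_singleton]
      · have : (i + 1) % 2 = 0 := by omega
        simp [pvBeta, hmod, hmod1, h2, this, pvIsIn_singleton]

-- ===== VERDICT (by name: the statement is the Claim_ definition above) =====
theorem slotdata_validation_spec : Claim_equal_slotdata_validation := by
  intro s _
  unfold Spec_slotdata_validation slotdata_validation slotdata_validation_alt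
  simp only [pvSplitOn_eq, pvALoop_eq_all]
  rw [pvEnum_eq_beta s.toList 0 (by norm_num),
    show (decide (PySem.Int.mod 0 2 ≠ 0)) = false from by decide]
  set cs := s.toList with hcs
  have hmain := (pvMain cs).1
  by_cases hb : (pvBeta false cs && decide (cs.length % 2 = 1)) = true
  · have hall : (pvSplit1 [] cs).all (pvAValids.contains ·) = true := by rw [hmain]; exact hb
    obtain ⟨h1, h2⟩ := Bool.and_eq_true_iff.1 hb
    have hodd : cs.length % 2 = 1 := by simpa using h2
    have hlen := pvLenRel cs [] hall
    simp only [List.length_nil] at hlen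
    by_cases h9 : (pvSplit1 [] cs).length > 9
    · rw [if_pos h9]
      have h17 : cs.length > 17 := by omega
      have : (cs.length % 2 == 0 || decide (cs.length > 17)) = true := by
        simp only [Bool.or_eq_true, beq_iff_eq, decide_eq_true_eq]
        omega
      rw [if_pos this]
    · rw [if_neg h9, hall]
      have : ¬ ((cs.length % 2 == 0 || decide (cs.length > 17)) = true) := by
        simp only [Bool.or_eq_true, beq_iff_eq, decide_eq_true_eq]
        rintro (h | h) <;> omega
      rw [if_neg this, h1]
  · have hb' : (pvBeta false cs && decide (cs.length % 2 = 1)) = false := Bool.eq_false_iff.2 hb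
    have hall : (pvSplit1 [] cs).all (pvAValids.contains ·) = false := by rw [hmain]; exact hb'
    have lhs_false : (if (pvSplit1 [] cs).length > 9 then false
        else (pvSplit1 [] cs).all (pvAValids.contains ·)) = false := by
      by_cases h9 : (pvSplit1 [] cs).length > 9
      · rw [if_pos h9]
      · rw [if_neg h9, hall]
    rw [lhs_false]
    rcases Bool.and_eq_false_iff.1 hb' with h | h
    · by_cases he : (cs.length % 2 == 0 || decide (cs.length > 17)) = true
      · rw [if_pos he]
      · rw [if_neg he, h]
    · have h0 : cs.length % 2 = 0 := by
        have := of_decide_eq_false h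
        omega
      have : (cs.length % 2 == 0 || decide (cs.length > 17)) = true := by
        simp only [Bool.or_eq_true, beq_iff_eq, decide_eq_true_eq]
        left
        exact h0
      rw [if_pos this]
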